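-- pv_equiv track=rewrite | github.com/bellshade/Python | manipulasi_bit/binary_or_operator.py | binary_or
-- ===== SOURCE A (Python) =====
-- def binary_or(a: int, b: int) -> str:
--     """
--     Ambil 2 bilangan integer,
--     ubah menjadi biner,
--     dan kembalikan angka biner yang merupakan hasil biner
--     atau operasi pada bilangan bulat yang disediakan.
--     >>> binary_or(1, 1)
--     '0b1'
--     >>> binary_or(0, 1)
--     '0b1'
--     >>> binary_or(1, 0)
--     '0b1'
--     >>> binary_or(0, 0)
--     '0b0'
--     >>> binary_or(58, 73)
--     '0b1111011'
--     >>> binary_or(-1, 2)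
--     Traceback (most recent call last):
--     ...
--     ValueError: Angka tidak boleh negatif
--     >>> binary_or(3, -1)
--     Traceback (most recent call last):
--     ...
--     ValueError: Angka tidak boleh negatif
--     """
--     if a < 0 or b < 0:
--         raise ValueError("Angka tidak boleh negatif")
--     a_binary = str(bin(a))[2:]
--     b_binary = str(bin(b))[2:]
--     max_binary = max(len(a_binary), len(b_binary))
--     return "0b" + "".join(
--         str(int("1" in (char_a, char_b)))
--         for char_a, char_b in zip(a_binary.zfill(max_binary), b_binary.zfill(max_binary))
--     )
-- ===== SOURCE B (Python) =====
-- def binary_or(a: int, b: int) -> str: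
--     if a < 0 or b < 0:
--         raise ValueError("Angka tidak boleh negatif")
--     return "0b" + bin(a | b)[2:]
-- ===== Notes on version B (the rewrite author's own statement) =====
-- stated objective: idiomatic
-- what changed: Replaced the per-bit pipeline (strip both bin() strings, zfill to a common width, zip and join a character per bit) by the native integer OR formatted once: '0b' + bin(a | b)[2:].
import Mathlib
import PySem

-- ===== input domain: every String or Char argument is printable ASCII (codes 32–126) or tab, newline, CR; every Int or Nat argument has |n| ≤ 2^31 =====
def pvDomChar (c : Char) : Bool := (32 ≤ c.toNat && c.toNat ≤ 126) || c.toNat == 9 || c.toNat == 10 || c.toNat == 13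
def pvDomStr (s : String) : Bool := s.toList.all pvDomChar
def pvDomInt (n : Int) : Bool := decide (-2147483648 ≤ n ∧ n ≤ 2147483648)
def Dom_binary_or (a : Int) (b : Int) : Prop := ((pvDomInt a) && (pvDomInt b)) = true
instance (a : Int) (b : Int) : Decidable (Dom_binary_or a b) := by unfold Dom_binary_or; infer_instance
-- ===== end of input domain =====

-- B replaces A's per-bit string zip (strip, zfill, zip, join) by the native integer OR
-- formatted once ("0b" + bin(a | b)[2:]); objective: idiomatic.


-- ===== PORT A =====
def binary_or (a : Int) (b : Int) : String :=
  if a < 0 || b < 0 then ""  -- Python A raises ValueError here; excluded by Pre_binary_or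
  else
    let a_binary := PySem.List.slice (PySem.Int.toBinChars0b a) (some 2) none
    let b_binary := PySem.List.slice (PySem.Int.toBinChars0b b) (some 2) none
    let max_binary : Int := max (PySem.List.len a_binary) (PySem.List.len b_binary)
    String.mk ('0' :: 'b' ::
      (List.zip (PySem.Chars.zfill a_binary max_binary) (PySem.Chars.zfill b_binary max_binary)).map
        (fun p => if p.1 = '1' ∨ p.2 = '1' then '1' else '0'))

-- ===== PORT B =====
def binary_or_alt (a : Int) (b : Int) : String :=
  if a < 0 || b < 0 then ""  -- Python B raises ValueError here; excluded by Pre_binary_or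
  else
    -- Python's `a | b` on ints, ported by hand (PySem has no Int or): exact for a, b ≥ 0,
    -- which the guard above guarantees on every path that reaches this line
    String.mk ('0' :: 'b' ::
      PySem.List.slice (PySem.Int.toBinChars0b (Int.ofNat (a.toNat ||| b.toNat))) (some 2) none)

-- ===== PRECONDITION & SPEC =====
-- Pre_ excludes exactly the inputs where Python A raises ValueError (a negative argument)
def Pre_binary_or (a : Int) (b : Int) : Prop := 0 ≤ a ∧ 0 ≤ b
instance (a : Int) (b : Int) : Decidable (Pre_binary_or a b) := by unfold Pre_binary_or; infer_instance
def pvWitness_binary_or : Int × Int := (58, 73)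

def Spec_binary_or (a : Int) (b : Int) (out : String) : Prop := out = binary_or_alt a b
instance (a : Int) (b : Int) (out : String) : Decidable (Spec_binary_or a b out) := by unfold Spec_binary_or; infer_instance

-- ===== CLAIM =====
def Claim_equal_binary_or : Prop := ∀ (a : Int) (b : Int), Dom_binary_or a b → Pre_binary_or a b → Spec_binary_or a b (binary_or a b)

-- ===== LEMMAS AND PROOFS =====

-- binary digits of n, MSB first, no leading zeros (the value of bin(n)[2:] for n ≥ 0)
def gBin (n : Nat) : List Char :=
  if h : n < 2 then [Nat.digitChar n]
  else gBin (n / 2) ++ [Nat.digitChar (n % 2)]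
decreasing_by omega

-- binary digits of n, MSB first, zero-padded to exactly width w (faithful for n < 2^w)
def padBin : Nat → Nat → List Char
  | 0, _ => []
  | w + 1, n => padBin w (n / 2) ++ [Nat.digitChar (n % 2)]

theorem toDigitsCore_eq_gBin (f : Nat) : ∀ (n : Nat) (ds : List Char), n < f →
    Nat.toDigitsCore 2 f n ds = gBin n ++ ds := by
  induction f with
  | zero => intro n ds h; omega
  | succ f ih =>
    intro n ds h
    rw [Nat.toDigitsCore]
    by_cases h2 : n / 2 = 0
    · rw [if_pos h2, gBin]
      have hn : n < 2 := by omega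
      rw [dif_pos hn, Nat.mod_eq_of_lt hn]
      rfl
    · rw [if_neg h2, ih (n / 2) _ (by omega)]
      conv_rhs => rw [gBin]
      rw [dif_neg (by omega : ¬ n < 2)]
      simp

theorem toDigits_eq_gBin (n : Nat) : Nat.toDigits 2 n = gBin n := by
  rw [Nat.toDigits, toDigitsCore_eq_gBin (n+1) n [] (by omega), List.append_nil]

theorem length_padBin (w : Nat) : ∀ n, (padBin w n).length = w := by
  induction w with
  | zero => intro n; rfl
  | succ w ih => intro n; simp [padBin, ih]

theorem gBin_eq_padBin (n : Nat) : gBin n = padBin (gBin n).length n := by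
  induction n using Nat.strong_induction_on with
  | _ n ih =>
    rw [gBin]
    by_cases h : n < 2
    · simp only [dif_pos h]
      show _ = padBin 1 n
      simp [padBin, Nat.mod_eq_of_lt h]
    · simp only [dif_neg h]
      rw [List.length_append, List.length_singleton]
      show _ = padBin ((gBin (n/2)).length + 1) n
      rw [padBin, ← ih (n/2) (by omega)]

theorem lt_two_pow_length_gBin (n : Nat) : n < 2 ^ (gBin n).length := by
  induction n using Nat.strong_induction_on with
  | _ n ih =>
    rw [gBin]
    by_cases h : n < 2
    · simpa [h] using h
    · have := ih (n/2) (by omega)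
      simp only [dif_neg h, List.length_append, List.length_singleton, pow_succ]
      omega

theorem padBin_succ_of_lt (w : Nat) : ∀ n, n < 2 ^ w → padBin (w + 1) n = '0' :: padBin w n := by
  induction w with
  | zero => intro n h; interval_cases n; rfl
  | succ w ih =>
    intro n h
    show padBin (w+1) (n/2) ++ _ = '0' :: (padBin w (n/2) ++ _)
    rw [ih (n/2) (by rw [pow_succ] at h; omega)]
    rfl

theorem padBin_add (k : Nat) : ∀ w n, n < 2 ^ w →
    padBin (w + k) n = List.replicate k '0' ++ padBin w n := by
  induction k with
  | zero => intro w n h; simp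
  | succ k ih =>
    intro w n h
    have : w + (k+1) = (w + k) + 1 := by omega
    rw [this, padBin_succ_of_lt (w+k) n (lt_of_lt_of_le h (Nat.pow_le_pow_right (by omega) (by omega))),
      ih w n h, List.replicate_succ]
    rfl

theorem mem_gBin (n : Nat) : ∀ c ∈ gBin n, c = '0' ∨ c = '1' := by
  induction n using Nat.strong_induction_on with
  | _ n ih =>
    intro c hc
    rw [gBin] at hc
    by_cases h : n < 2
    · rw [dif_pos h] at hc
      interval_cases n <;> simp_all <;> subst hc <;> decide
    · rw [dif_neg h, List.mem_append] at hc
      rcases hc with hc | hc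
      · exact ih (n/2) (by omega) c hc
      · have h2 : n % 2 < 2 := Nat.mod_lt _ (by omega)
        interval_cases h' : n % 2 <;> simp_all <;> subst hc <;> decide

theorem length_gBin (n : Nat) : (gBin n).length = n.log2 + 1 := by
  induction n using Nat.strong_induction_on with
  | _ n ih =>
    rw [gBin, Nat.log2_def]
    by_cases h : n < 2
    · rw [dif_pos h, if_neg (by omega : ¬ 2 ≤ n)]; simp
    · rw [dif_neg h, if_pos (by omega : 2 ≤ n)]
      simp [ih (n/2) (by omega)]

theorem log2_or (m n : Nat) : (m ||| n).log2 = max m.log2 n.log2 := by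
  apply le_antisymm
  · by_cases h0 : m ||| n = 0
    · simp [h0]
    · have hm : m < 2 ^ (max m.log2 n.log2 + 1) := by
        calc m < 2 ^ (gBin m).length := lt_two_pow_length_gBin m
        _ ≤ _ := by rw [length_gBin]; exact Nat.pow_le_pow_right (by omega) (by omega)
      have hn : n < 2 ^ (max m.log2 n.log2 + 1) := by
        calc n < 2 ^ (gBin n).length := lt_two_pow_length_gBin n
        _ ≤ _ := by rw [length_gBin]; exact Nat.pow_le_pow_right (by omega) (by omega)
      have hlt : (m ||| n).log2 < max m.log2 n.log2 + 1 := by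
        rw [Nat.log2_lt h0]
        exact Nat.or_lt_two_pow hm hn
      omega
  · apply max_le <;> rw [Nat.log2_eq_log_two, Nat.log2_eq_log_two]
    · exact Nat.log_mono_right Nat.left_le_or
    · exact Nat.log_mono_right Nat.right_le_or

theorem zfill_gBin (n L : Nat) (h : (gBin n).length ≤ L) :
    PySem.Chars.zfill (gBin n) (L : Int) = padBin L n := by
  have hne : gBin n ≠ [] := by
    have hl := length_gBin n
    intro hnil
    rw [hnil] at hl
    simp at hl
  obtain ⟨c, rest, hcr⟩ := List.exists_cons_of_ne_nil hne
  have hc : c = '0' ∨ c = '1' := mem_gBin n c (by rw [hcr]; exact List.mem_cons_self)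
  have hpm : ¬ (c = '+' ∨ c = '-') := by rcases hc with h' | h' <;> simp [h']
  by_cases hLe : (L : Int) ≤ ((gBin n).length : Int)
  · have hEq : L = (gBin n).length := by omega
    simp only [PySem.Chars.zfill, if_pos hLe]
    rw [hEq, ← gBin_eq_padBin]
  · simp only [PySem.Chars.zfill, if_neg hLe, hcr, if_neg hpm]
    rw [← hcr]
    have hL : L = (gBin n).length + (L - (gBin n).length) := by omega
    conv_rhs => rw [hL]
    rw [padBin_add _ _ _ (lt_two_pow_length_gBin n), ← gBin_eq_padBin]
    norm_num
    omega

theorem mod_two_or (m n : Nat) : (m ||| n) % 2 = if m % 2 = 1 ∨ n % 2 = 1 then 1 else 0 := by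
  have h := Nat.testBit_lor m n 0
  simp only [Nat.testBit_zero] at h
  have h2 := Nat.mod_two_eq_zero_or_one (m ||| n)
  by_cases hm : m % 2 = 1
  · simp [hm] at h ⊢
  · by_cases hn : n % 2 = 1
    · simp [hm, hn] at h ⊢
    · simp only [hm, hn, or_self, if_false, decide_false, Bool.or_self] at h ⊢
      rcases h2 with h2 | h2
      · exact h2
      · rw [h2] at h
        simp at h

theorem zip_map_or (w : Nat) : ∀ m n : Nat, m < 2 ^ w → n < 2 ^ w →
    (List.zip (padBin w m) (padBin w n)).map
      (fun p => if p.1 = '1' ∨ p.2 = '1' then '1' else '0') = padBin w (m ||| n) := by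
  induction w with
  | zero => intro m n _ _; rfl
  | succ w ih =>
    intro m n hm hn
    show (List.zip (padBin w (m/2) ++ _) (padBin w (n/2) ++ _)).map _ = _
    rw [List.zip_append (by rw [length_padBin, length_padBin]), List.map_append,
      ih (m/2) (n/2) (by rw [pow_succ] at hm; omega) (by rw [pow_succ] at hn; omega)]
    show _ = padBin w ((m ||| n)/2) ++ [Nat.digitChar ((m ||| n) % 2)]
    rw [Nat.or_div_two, mod_two_or]
    congr 1
    have hm2 := Nat.mod_two_eq_zero_or_one m
    have hn2 := Nat.mod_two_eq_zero_or_one n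
    rcases hm2 with h1 | h1 <;> rcases hn2 with h2 | h2 <;> simp [h1, h2] <;> decide

-- ===== VERDICT =====
theorem binary_or_spec : Claim_equal_binary_or := by
  intro a b _ hpre
  obtain ⟨ha, hb⟩ := hpre
  unfold Spec_binary_or binary_or binary_or_alt
  have hg : (a < 0 || b < 0) = false := by simp; omega
  rw [hg]
  simp only [Bool.false_eq_true, if_false]
  obtain ⟨m, rfl⟩ := Int.eq_ofNat_of_zero_le ha
  obtain ⟨n, rfl⟩ := Int.eq_ofNat_of_zero_le hb
  have hsl : ∀ k : Nat, PySem.List.slice (PySem.Int.toBinChars0b ((k : Int))) (some 2) none = gBin k := by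
    intro k
    rw [show ((2:Int)) = ((2:Nat):Int) from rfl, PySem.List.slice_from_natCast]
    rw [PySem.Int.toBinChars0b, if_neg (by omega : ¬ ((k:Int) < 0))]
    simp [toDigits_eq_gBin]
  simp only [Int.toNat_natCast, Int.ofNat_eq_natCast, hsl, PySem.List.len_eq]
  have hmax : max ((gBin m).length : Int) ((gBin n).length : Int)
      = ((max (gBin m).length (gBin n).length : Nat) : Int) := by exact_mod_cast rfl
  rw [hmax, zfill_gBin m _ (le_max_left _ _), zfill_gBin n _ (le_max_right _ _)]
  rw [zip_map_or _ m n
    (lt_of_lt_of_le (lt_two_pow_length_gBin m) (Nat.pow_le_pow_right (by omega) (le_max_left _ _)))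
    (lt_of_lt_of_le (lt_two_pow_length_gBin n) (Nat.pow_le_pow_right (by omega) (le_max_right _ _)))]
  have hM : (gBin (m ||| n)).length = max (gBin m).length (gBin n).length := by
    rw [length_gBin, length_gBin, length_gBin, log2_or]
    omega
  conv_rhs => rw [gBin_eq_padBin (m ||| n), hM]
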